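-- pv_equiv track=rewrite | github.com/aldosiciliano/SGP-Finance | backend/app/routers/reportes.py | _month_periods
-- ===== SOURCE A (Python) =====
-- def _month_periods(count: int, anchor_month: int, anchor_year: int) -> list[tuple[int, int]]:
--     periods = []
--
--     for offset in range(count - 1, -1, -1):
--         month_index = anchor_month - offset
--         year = anchor_year
--
--         while month_index <= 0:
--             month_index += 12
--             year -= 1
--
--         periods.append((year, month_index))
--
--     return periods
-- ===== SOURCE B (Python) =====
-- def _month_periods(count: int, anchor_month: int, anchor_year: int) -> list[tuple[int, int]]:
--     # Split at the normalization boundary: divmod for the non-positive months, bulk zip for the rest.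
--     start = anchor_month - count + 1
--     cut = min(max(1 - start, 0), count)  # k < cut have start + k <= 0
--     periods = [(anchor_year + q, r + 1)
--                for q, r in map(divmod, range(start - 1, start - 1 + cut), (12,) * cut)]
--     periods += zip((anchor_year,) * (count - cut), range(start + cut, start + count))
--     return periods
-- ===== Notes on version B (the rewrite author's own statement) =====
-- stated objective: alternative
-- what changed: Instead of normalizing each month with a while loop, B computes the normalization boundary once and splits the range there: a divmod-based comprehension for the non-positive months and a bulk zip of plain (year, month) pairs for the rest.
import Mathlib
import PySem

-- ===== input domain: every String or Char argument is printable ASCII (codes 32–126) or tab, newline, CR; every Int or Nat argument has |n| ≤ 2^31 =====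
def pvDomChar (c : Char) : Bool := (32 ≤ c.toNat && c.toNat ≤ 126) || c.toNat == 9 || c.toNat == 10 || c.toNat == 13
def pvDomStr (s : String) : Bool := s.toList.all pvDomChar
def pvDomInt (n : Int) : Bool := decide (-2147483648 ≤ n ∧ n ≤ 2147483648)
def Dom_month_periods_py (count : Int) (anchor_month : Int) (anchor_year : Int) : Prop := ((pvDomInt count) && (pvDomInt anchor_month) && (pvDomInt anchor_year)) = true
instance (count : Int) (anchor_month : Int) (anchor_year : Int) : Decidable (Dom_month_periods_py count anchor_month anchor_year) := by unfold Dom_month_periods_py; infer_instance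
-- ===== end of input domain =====

-- B replaces A's per-offset while-loop normalization by splitting the range at the normalization
-- boundary: divmod for the non-positive months, bulk pairing for the rest (objective: alternative).

-- ===== PORT A =====
-- the 'while month_index <= 0: month_index += 12; year -= 1' loop, returning (year, month_index)
def pvNormWhile (m y : Int) : Int × Int :=
  if m ≤ 0 then pvNormWhile (m + 12) (y - 1) else (y, m)
termination_by (1 - m).toNat
decreasing_by omega

def month_periods_py (count : Int) (anchor_month : Int) (anchor_year : Int) : List (Int × Int) :=
  (PySem.List.pyRange (count - 1) (-1) (-1)).foldl
    (fun periods offset => periods ++ [pvNormWhile (anchor_month - offset) anchor_year]) []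

-- ===== PORT B =====
def month_periods_py_alt (count : Int) (anchor_month : Int) (anchor_year : Int) : List (Int × Int) :=
  let start := anchor_month - count + 1
  let cut := min (max (1 - start) 0) count
  -- [(anchor_year + q, r + 1) for q, r in map(divmod, range(start-1, start-1+cut), (12,)*cut)]
  let head := (PySem.List.pyRange (start - 1) (start - 1 + cut) 1).map
    (fun x => (anchor_year + PySem.Int.floordiv x 12, PySem.Int.mod x 12 + 1))
  -- periods += zip((anchor_year,)*(count-cut), range(start+cut, start+count))
  head ++ (List.replicate (count - cut).toNat anchor_year).zip
    (PySem.List.pyRange (start + cut) (start + count) 1)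

-- ===== PRECONDITION & SPEC =====
def Spec_month_periods_py (count : Int) (anchor_month : Int) (anchor_year : Int) (out : List (Int × Int)) : Prop := out = month_periods_py_alt count anchor_month anchor_year
instance (count : Int) (anchor_month : Int) (anchor_year : Int) (out : List (Int × Int)) : Decidable (Spec_month_periods_py count anchor_month anchor_year out) := by unfold Spec_month_periods_py; infer_instance

-- ===== CLAIM (what is proved, stated in full; the proofs are below) =====
def Claim_equal_month_periods_py : Prop := ∀ (count : Int) (anchor_month : Int) (anchor_year : Int), Dom_month_periods_py count anchor_month anchor_year → Spec_month_periods_py count anchor_month anchor_year (month_periods_py count anchor_month anchor_year)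

-- ===== LEMMAS AND PROOFS =====

-- the while-loop in closed form
theorem pvNormWhile_closed (m y : Int) :
    pvNormWhile m y =
      (y - max 0 (-(PySem.Int.floordiv (m - 1) 12)),
       m + 12 * max 0 (-(PySem.Int.floordiv (m - 1) 12))) := by
  fun_induction pvNormWhile m y with
  | case1 m y h ih =>
    rw [ih]
    rw [PySem.Int.floordiv_eq_ediv_of_pos (by omega : (0:Int) < 12),
        PySem.Int.floordiv_eq_ediv_of_pos (by omega : (0:Int) < 12)]
    simp only [Prod.mk.injEq]
    constructor <;> omega
  | case2 m y h =>
    rw [PySem.Int.floordiv_eq_ediv_of_pos (by omega : (0:Int) < 12)]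
    simp only [Prod.mk.injEq]
    constructor <;> omega

-- a step-1 range is a re-indexed List.range
theorem pv_range1 (a b : Int) :
    PySem.List.pyRange a b 1 =
      (List.range (b - a).toNat).map (fun (k : Nat) => a + (k : Int)) := by
  simp only [PySem.List.pyRange]
  norm_num
  split_ifs with h
  · rfl
  · have h1 : (b - a).toNat = 0 := by omega
    simp [h1]

-- A's reversed range is a re-indexed List.range
theorem pv_rangeA (count : Int) :
    PySem.List.pyRange (count - 1) (-1) (-1) =
      (List.range count.toNat).map (fun (k : Nat) => count - 1 - (k : Int)) := by
  simp only [PySem.List.pyRange]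
  norm_num
  split_ifs with h
  · exact List.map_congr_left (fun k _ => by ring)
  · have h1 : count.toNat = 0 := by omega
    simp [h1]

-- the per-index closed form both sides compute
def pvClosed (start y : Int) (k : Nat) : Int × Int :=
  (y - max 0 (-(PySem.Int.floordiv (start + k - 1) 12)),
   start + k + 12 * max 0 (-(PySem.Int.floordiv (start + k - 1) 12)))

theorem pv_A_closed (count am ay : Int) :
    month_periods_py count am ay =
      (List.range count.toNat).map (pvClosed (am - count + 1) ay) := by
  unfold month_periods_py
  rw [pv_rangeA count, PySem.List.foldl_append_singleton_eq_map]
  simp only [List.nil_append, List.map_map]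
  apply List.map_congr_left
  intro k _
  simp only [Function.comp]
  rw [pvNormWhile_closed]
  unfold pvClosed
  congr 2 <;> ring_nf

theorem pv_B_closed (count am ay : Int) :
    month_periods_py_alt count am ay =
      (List.range count.toNat).map (pvClosed (am - count + 1) ay) := by
  simp only [month_periods_py_alt]
  set start := am - count + 1 with hstart
  set cut := min (max (1 - start) 0) count with hcut
  rw [pv_range1, pv_range1]
  have hsplit : count.toNat = cut.toNat + (count - cut).toNat := by omega
  rw [hsplit, List.range_add, List.map_append, List.map_map]
  have hzip : (List.replicate (count - cut).toNat ay).zip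
      ((List.range ((start + count) - (start + cut)).toNat).map
        (fun (k : Nat) => start + cut + (k : Int))) =
      (List.range (count - cut).toNat).map (fun (k : Nat) => (ay, start + cut + (k : Int))) := by
    have hr : List.replicate (count - cut).toNat ay =
        (List.range (count - cut).toNat).map (fun (_ : Nat) => ay) := by
      simp [List.map_const']
    have hlen : (start + count - (start + cut)).toNat = (count - cut).toNat := by omega
    rw [hr, hlen, List.zip_map']
  rw [hzip]
  congr 1
  · -- head: the non-positive months, k < cut
    have hc : (start - 1 + cut - (start - 1)).toNat = cut.toNat := by omega
    rw [hc]
    apply List.map_congr_left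
    intro k hk
    simp only [List.mem_range] at hk
    have hk' : (k : Int) < cut := by omega
    simp only [Function.comp_apply]
    unfold pvClosed
    rw [PySem.Int.floordiv_eq_ediv_of_pos (by omega : (0:Int) < 12),
        PySem.Int.floordiv_eq_ediv_of_pos (by omega : (0:Int) < 12),
        PySem.Int.mod_eq_emod_of_pos (by omega : (0:Int) < 12)]
    have hm0 : start + (k : Int) ≤ 0 := by omega
    simp only [Prod.mk.injEq]
    constructor <;> omega
  · -- tail: the already-positive months
    rw [List.map_map]
    apply List.map_congr_left
    intro k hk
    simp only [List.mem_range] at hk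
    simp only [Function.comp_apply]
    have hk' : (k : Int) < count - cut := by omega
    unfold pvClosed
    rw [PySem.Int.floordiv_eq_ediv_of_pos (by omega : (0:Int) < 12)]
    have hcast : ((cut.toNat + k : Nat) : Int) = cut + k := by omega
    rw [hcast]
    have hm0 : 1 ≤ start + (cut + (k : Int)) := by omega
    simp only [Prod.mk.injEq]
    constructor <;> omega

-- ===== VERDICT (by name: the statement is the Claim_ definition above) =====
theorem month_periods_py_spec : Claim_equal_month_periods_py := by
  intro count am ay _
  show month_periods_py count am ay = month_periods_py_alt count am ay
  rw [pv_A_closed, pv_B_closed]
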